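-- pv_equiv track=rewrite | github.com/centerseed/zenos | scripts/migrate_imports.py | _build_grouped_imports
-- ===== SOURCE A (Python) =====
-- def _build_grouped_imports(symbols: list[str], mapping: dict[str, str], indent: str = "") -> str:
--     """Group symbols by target module and build import lines."""
--     groups: dict[str, list[str]] = {}
--     unmapped = []
--     for sym in symbols:
--         if sym in mapping:
--             mod = mapping[sym]
--             groups.setdefault(mod, []).append(sym)
--         else:
--             unmapped.append(sym)
--
--     lines = []
--     for mod in sorted(groups.keys()):
--         syms = sorted(groups[mod])
--         if len(syms) == 1:
--             lines.append(f"{indent}from {mod} import {syms[0]}")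
--         else:
--             lines.append(f"{indent}from {mod} import {', '.join(syms)}")
--
--     if unmapped:
--         lines.append(f"{indent}# UNMAPPED: {', '.join(unmapped)}")
--
--     return "\n".join(lines)
-- ===== SOURCE B (Python) =====
-- def _build_grouped_imports(symbols: list[str], mapping: dict[str, str], indent: str = "") -> str:
--     """No grouping dict: take the sorted distinct target modules, then for each
--     module scan symbols for the ones it owns; join collapses singletons itself."""
--     modules = sorted(set(mapping[s] for s in symbols if s in mapping))
--     lines = [
--         f"{indent}from {mod} import "
--         + ", ".join(sorted(s for s in symbols if mapping.get(s) == mod))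
--         for mod in modules
--     ]
--     unmapped = [s for s in symbols if s not in mapping]
--     if unmapped:
--         lines.append(f"{indent}# UNMAPPED: {', '.join(unmapped)}")
--     return "\n".join(lines)
-- ===== Notes on version B (the rewrite author's own statement) =====
-- stated objective: alternative
-- what changed: B builds no grouping dict at all: it takes the sorted distinct target modules and, per module, filters-and-sorts the symbols belonging to it, dropping A's redundant single-symbol branch since ', '.join collapses a singleton anyway.
import Mathlib
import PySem

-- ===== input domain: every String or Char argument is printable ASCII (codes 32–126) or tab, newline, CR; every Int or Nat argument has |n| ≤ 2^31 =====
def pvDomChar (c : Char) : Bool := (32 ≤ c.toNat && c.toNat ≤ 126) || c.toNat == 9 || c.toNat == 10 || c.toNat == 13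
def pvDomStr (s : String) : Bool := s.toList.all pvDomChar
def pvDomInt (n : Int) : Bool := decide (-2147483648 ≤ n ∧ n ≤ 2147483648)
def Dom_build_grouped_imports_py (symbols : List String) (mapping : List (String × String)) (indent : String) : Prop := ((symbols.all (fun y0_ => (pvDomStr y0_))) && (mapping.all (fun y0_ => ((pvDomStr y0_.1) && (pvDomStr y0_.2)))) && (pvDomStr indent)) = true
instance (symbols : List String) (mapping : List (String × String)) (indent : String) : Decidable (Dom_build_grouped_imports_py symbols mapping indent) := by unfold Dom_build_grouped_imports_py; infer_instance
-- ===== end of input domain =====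

-- B drops the grouping dict: sorted distinct modules, then per-module filter+sort of symbols;
-- the len==1 branch is dropped since ', '.join of a singleton is the element. Objective: alternative decomposition.

-- shared primitive: dict lookup (first match), sym in mapping / mapping[sym] / mapping.get(sym)
def pvLookup (mapping : List (String × String)) (s : String) : Option String :=
  (PySem.Dict.mk mapping).get? s

-- ===== PORT A =====
def build_grouped_imports_py (symbols : List String) (mapping : List (String × String)) (indent : String) : String :=
  let st := symbols.foldl (fun (st : PySem.Dict String (List String) × List String) sym =>
    match pvLookup mapping sym with
    | some mod => (st.1.modify mod [] (fun l => l ++ [sym]), st.2)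
    | none => (st.1, st.2 ++ [sym])) (PySem.Dict.empty, [])
  let groups := st.1
  let unmapped := st.2
  let lines := (PySem.List.sorted groups.keys (fun x => x) false).map (fun mod =>
    let syms := PySem.List.sorted (groups.getD mod []) (fun x => x) false
    if syms.length == 1 then
      indent ++ "from " ++ mod ++ " import " ++ syms.headI
    else
      indent ++ "from " ++ mod ++ " import " ++ PySem.Str.join ", " syms)
  let lines := if unmapped.isEmpty then lines
    else lines ++ [indent ++ "# UNMAPPED: " ++ PySem.Str.join ", " unmapped]
  PySem.Str.join "\n" lines

-- ===== PORT B =====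
def build_grouped_imports_py_alt (symbols : List String) (mapping : List (String × String)) (indent : String) : String :=
  let modules := PySem.List.sorted
    (PySem.Set.ofList (symbols.filterMap (fun s => pvLookup mapping s))) (fun x => x) false
  let lines := modules.map (fun mod =>
    indent ++ "from " ++ mod ++ " import " ++
      PySem.Str.join ", "
        (PySem.List.sorted (symbols.filter (fun s => pvLookup mapping s == some mod)) (fun x => x) false))
  let unmapped := symbols.filter (fun s => (pvLookup mapping s).isNone)
  let lines := if unmapped.isEmpty then lines
    else lines ++ [indent ++ "# UNMAPPED: " ++ PySem.Str.join ", " unmapped]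
  PySem.Str.join "\n" lines

-- ===== PRECONDITION & SPEC =====
def Spec_build_grouped_imports_py (symbols : List String) (mapping : List (String × String)) (indent : String) (out : String) : Prop := out = build_grouped_imports_py_alt symbols mapping indent
instance (symbols : List String) (mapping : List (String × String)) (indent : String) (out : String) : Decidable (Spec_build_grouped_imports_py symbols mapping indent out) := by unfold Spec_build_grouped_imports_py; infer_instance

-- ===== CLAIM (what is proved, stated in full; the proofs are below) =====
def Claim_equal_build_grouped_imports_py : Prop := ∀ (symbols : List String) (mapping : List (String × String)) (indent : String), Dom_build_grouped_imports_py symbols mapping indent → Spec_build_grouped_imports_py symbols mapping indent (build_grouped_imports_py symbols mapping indent)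

-- ===== LEMMAS AND PROOFS =====

-- mapped (module, symbol) pairs of the symbol list, in order
def pvPairs (mapping : List (String × String)) (symbols : List String) : List (String × String) :=
  symbols.filterMap (fun s => (pvLookup mapping s).map (fun m => (m, s)))

theorem pvFold_split (mapping : List (String × String)) (symbols : List String)
    (d : PySem.Dict String (List String)) (u : List String) :
    symbols.foldl (fun (st : PySem.Dict String (List String) × List String) sym =>
      match pvLookup mapping sym with
      | some mod => (st.1.modify mod [] (fun l => l ++ [sym]), st.2)
      | none => (st.1, st.2 ++ [sym])) (d, u)
    = ((pvPairs mapping symbols).foldl (fun d p => d.modify p.1 [] (fun l => l ++ [p.2])) d,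
       u ++ symbols.filter (fun s => (pvLookup mapping s).isNone)) := by
  induction symbols generalizing d u with
  | nil => simp [pvPairs]
  | cons s rest ih =>
    cases h : pvLookup mapping s with
    | some m => simp [pvPairs, h, List.foldl_cons, ih]
    | none => simp [pvPairs, h, List.foldl_cons, ih]

theorem pvPairs_map_fst (mapping : List (String × String)) (symbols : List String) :
    (pvPairs mapping symbols).map Prod.fst = symbols.filterMap (fun s => pvLookup mapping s) := by
  induction symbols with
  | nil => simp [pvPairs]
  | cons s rest ih =>
    cases h : pvLookup mapping s with
    | some m => simp [pvPairs, h] at ih ⊢; exact ih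
    | none => simp [pvPairs, h] at ih ⊢; exact ih

theorem pvPairs_filter_snd (mapping : List (String × String)) (symbols : List String) (mod : String) :
    ((pvPairs mapping symbols).filter (fun p => p.1 == mod)).map Prod.snd
    = symbols.filter (fun s => pvLookup mapping s == some mod) := by
  induction symbols with
  | nil => simp [pvPairs]
  | cons s rest ih =>
    cases h : pvLookup mapping s with
    | some m =>
      by_cases hm : m = mod
      · simp [pvPairs, h, hm] at ih ⊢; exact ih
      · simp [pvPairs, h, hm] at ih ⊢; exact ih
    | none => simp [pvPairs, h] at ih ⊢; exact ih

theorem pv_join_singleton_collapse (pre : String) (syms : List String) :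
    (if syms.length == 1 then pre ++ syms.headI else pre ++ PySem.Str.join ", " syms)
    = pre ++ PySem.Str.join ", " syms := by
  cases syms with
  | nil => simp
  | cons x rest =>
    cases rest with
    | nil => simp [PySem.Str.join]
    | cons y t => simp

-- ===== VERDICT (by name: the statement is the Claim_ definition above) =====
theorem build_grouped_imports_py_spec : Claim_equal_build_grouped_imports_py := by
  intro symbols mapping indent _
  unfold Spec_build_grouped_imports_py build_grouped_imports_py build_grouped_imports_py_alt
  rw [pvFold_split]
  have hkeys : ((pvPairs mapping symbols).foldl
      (fun d p => d.modify p.1 [] (fun l => l ++ [p.2])) PySem.Dict.empty).keys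
      = PySem.Set.ofList (symbols.filterMap (fun s => pvLookup mapping s)) := by
    rw [PySem.Dict.keys_foldl_modify_key]
    simp [PySem.Set.update, PySem.Set.ofList_eq_foldl, pvPairs_map_fst]
  have hgetD : ∀ mod, ((pvPairs mapping symbols).foldl
      (fun d p => d.modify p.1 [] (fun l => l ++ [p.2])) PySem.Dict.empty).getD mod []
      = symbols.filter (fun s => pvLookup mapping s == some mod) := by
    intro mod
    rw [PySem.Dict.getD_foldl_modify_append]
    simp [pvPairs_filter_snd]
  simp only [hkeys, hgetD, List.nil_append]
  have hM := List.map_congr_left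
    (l := PySem.List.sorted (PySem.Set.ofList (symbols.filterMap (fun s => pvLookup mapping s))) (fun x => x) false)
    (fun mod _ => pv_join_singleton_collapse (indent ++ "from " ++ mod ++ " import ")
      (PySem.List.sorted (symbols.filter (fun s => pvLookup mapping s == some mod)) (fun x => x) false))
  rw [hM]
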